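-- pv_equiv track=rewrite | github.com/zeinabmasoumi80/- | main.py | empty_slots
-- ===== SOURCE A (Python) =====
-- from typing import List, Tuple
--
-- def empty_slots(board: List[List[int]]) -> List[Tuple[int, int]]:
--     result = [(x//8, x%8) for x in range(64)]
--     for i, row in enumerate(board):
--         for j, slot in enumerate(row):
--             if slot != 0:
--                 for k in range(8):
--                     if (j, k) in result:
--                         result.remove((j, k))
--                     if (k, i) in result:
--                         result.remove((k, i))
--                 for k in range(j, -1, -1):
--                     if (k, i-abs(k-j)) in result:
--                         result.remove((k, i-abs(k-j)))
--                 for k in range(j, 8):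
--                     if (k, i+abs(k-j)) in result:
--                         result.remove((k, i+abs(k-j)))
--                 for k in range(i, -1, -1):
--                     if (j+abs(k-i), k) in result:
--                         result.remove((j+abs(k-i), k))
--                 for k in range(i, 8):
--                     if (j-abs(k-i), k) in result:
--                         result.remove((j-abs(k-i), k))
--
--     return result
-- ===== SOURCE B (Python) =====
-- def empty_slots(board):
--     queens = [(j, i) for i, row in enumerate(board)
--                      for j, slot in enumerate(row) if slot != 0]
--     result = []
--     for x in range(64):
--         a, b = divmod(x, 8)
--         if all(a != qa and b != qb and a - b != qa - qb and a + b != qa + qb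
--                for qa, qb in queens):
--             result.append((a, b))
--     return result
-- ===== Notes on version B (the rewrite author's own statement) =====
-- stated objective: faster
-- what changed: B collects the queen positions once and then emits each of the 64 squares in order iff a direct arithmetic check (row, column, diagonal difference/sum against each queen) says it is unattacked, replacing A's per-queen quintuple of removal loops, each doing membership scans and list.remove over the result list.
import Mathlib
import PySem

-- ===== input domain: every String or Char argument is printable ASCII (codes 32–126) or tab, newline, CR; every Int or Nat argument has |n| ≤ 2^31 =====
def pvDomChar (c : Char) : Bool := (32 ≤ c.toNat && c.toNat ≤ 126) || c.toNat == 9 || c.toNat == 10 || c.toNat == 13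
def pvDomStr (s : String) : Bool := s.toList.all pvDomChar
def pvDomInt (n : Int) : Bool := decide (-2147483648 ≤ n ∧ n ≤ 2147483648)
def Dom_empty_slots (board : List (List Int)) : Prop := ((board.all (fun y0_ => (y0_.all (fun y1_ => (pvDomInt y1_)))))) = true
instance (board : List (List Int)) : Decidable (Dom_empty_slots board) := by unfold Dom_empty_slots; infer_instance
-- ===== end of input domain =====

-- B replaces A's five per-queen removal loops by a single per-square "not attacked by any queen" test (alternative decomposition, same result).

-- ===== PORT A =====
-- helper: 'if (p) in result: result.remove(p)' (remove of a checked-present element)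
def pvCondRemove (res : List (Int × Int)) (p : Int × Int) : List (Int × Int) :=
  if res.contains p then (PySem.List.remove? res p).getD res else res

-- helper: the body of A's 'if slot != 0:' branch (the five removal loops, in order)
def pvQueenRemovals (res : List (Int × Int)) (i j : Int) : List (Int × Int) :=
  (PySem.List.pyRange i 8 1).foldl (fun r k => pvCondRemove r (j - |k - i|, k))
    ((PySem.List.pyRange i (-1) (-1)).foldl (fun r k => pvCondRemove r (j + |k - i|, k))
      ((PySem.List.pyRange j 8 1).foldl (fun r k => pvCondRemove r (k, i + |k - j|))
        ((PySem.List.pyRange j (-1) (-1)).foldl (fun r k => pvCondRemove r (k, i - |k - j|))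
          ((PySem.List.pyRange 0 8 1).foldl
            (fun r k => pvCondRemove (pvCondRemove r (j, k)) (k, i)) res))))

def empty_slots (board : List (List Int)) : List (Int × Int) :=
  let init := (PySem.List.pyRange 0 64 1).map
    (fun x => (PySem.Int.floordiv x 8, PySem.Int.mod x 8))
  (PySem.List.enumerate board).foldl (fun res ir =>
    (PySem.List.enumerate ir.2).foldl (fun res js =>
      if js.2 ≠ 0 then pvQueenRemovals res ir.1 js.1 else res) res) init

-- ===== PORT B =====
-- 'a != qa and b != qb and a - b != qa - qb and a + b != qa + qb'
def pvNoAttack (a b : Int) (q : Int × Int) : Bool :=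
  decide (a ≠ q.1) && decide (b ≠ q.2) && decide (a - b ≠ q.1 - q.2) && decide (a + b ≠ q.1 + q.2)

-- 'queens = [(j, i) for i, row in enumerate(board) for j, slot in enumerate(row) if slot != 0]'
def pvQueens (board : List (List Int)) : List (Int × Int) :=
  (PySem.List.enumerate board).flatMap (fun ir =>
    (PySem.List.enumerate ir.2).filterMap (fun js =>
      if js.2 ≠ 0 then some (js.1, ir.1) else none))

def empty_slots_alt (board : List (List Int)) : List (Int × Int) :=
  (PySem.List.pyRange 0 64 1).foldl (fun res x =>
    let a := PySem.Int.floordiv x 8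
    let b := PySem.Int.mod x 8
    if (pvQueens board).all (pvNoAttack a b) then res ++ [(a, b)] else res) []

-- ===== PRECONDITION & SPEC =====
def Spec_empty_slots (board : List (List Int)) (out : List (Int × Int)) : Prop := out = empty_slots_alt board
instance (board : List (List Int)) (out : List (Int × Int)) : Decidable (Spec_empty_slots board out) := by unfold Spec_empty_slots; infer_instance

-- ===== CLAIM (what is proved, stated in full; the proofs are below) =====
def Claim_equal_empty_slots : Prop := ∀ (board : List (List Int)), Dom_empty_slots board → Spec_empty_slots board (empty_slots board)

-- ===== LEMMAS AND PROOFS =====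

-- invariant on A's working list: no duplicates, all coordinates within the 8×8 board
def pvGood (L : List (Int × Int)) : Prop :=
  L.Nodup ∧ ∀ p ∈ L, 0 ≤ p.1 ∧ p.1 ≤ 7 ∧ 0 ≤ p.2 ∧ p.2 ≤ 7

lemma pvGood_filter (L : List (Int × Int)) (hL : pvGood L) (f : Int × Int → Bool) :
    pvGood (L.filter f) :=
  ⟨hL.1.filter f, fun p hp => hL.2 p (List.mem_of_mem_filter hp)⟩

lemma pvCondRemove_eq_filter (L : List (Int × Int)) (p : Int × Int) (h : L.Nodup) :
    pvCondRemove L p = L.filter (fun q => q != p) := by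
  unfold pvCondRemove
  by_cases hp : p ∈ L
  · rw [if_pos (by simpa using hp), PySem.List.remove?_eq_some_erase L p hp]
    simp [h.erase_eq_filter]
  · rw [if_neg (by simpa using hp)]
    symm
    apply List.filter_eq_self.2
    intro q hq
    simp only [bne_iff_ne, ne_eq]
    rintro rfl; exact hp hq

lemma pvFoldl_condRemove (e : Int → Int × Int) (ks : List Int) (L : List (Int × Int))
    (h : L.Nodup) :
    ks.foldl (fun r k => pvCondRemove r (e k)) L
      = L.filter (fun p => ks.all (fun k => p != e k)) := by
  induction ks generalizing L with
  | nil => simp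
  | cons k ks ih =>
    simp only [List.foldl_cons]
    rw [pvCondRemove_eq_filter L _ h, ih _ (h.filter _), List.filter_filter]
    apply List.filter_congr
    intro p _
    simp [Bool.and_comm]

lemma pvFoldl_condRemove2 (e f : Int → Int × Int) (ks : List Int) (L : List (Int × Int))
    (h : L.Nodup) :
    ks.foldl (fun r k => pvCondRemove (pvCondRemove r (e k)) (f k)) L
      = L.filter (fun p => ks.all (fun k => p != e k && p != f k)) := by
  induction ks generalizing L with
  | nil => simp
  | cons k ks ih =>
    simp only [List.foldl_cons]
    rw [pvCondRemove_eq_filter L _ h, pvCondRemove_eq_filter _ _ (h.filter _),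
      ih _ ((h.filter _).filter _), List.filter_filter, List.filter_filter]
    apply List.filter_congr
    intro p _
    simp only [List.all_cons]
    ac_rfl

-- one queen at row i, column j: A's five removal loops filter out exactly the attacked squares
lemma pvQueenRemovals_eq_filter (L : List (Int × Int)) (i j : Int) (hL : pvGood L) :
    pvQueenRemovals L i j = L.filter (fun p => pvNoAttack p.1 p.2 (j, i)) := by
  have h1 := hL.1
  unfold pvQueenRemovals
  rw [pvFoldl_condRemove2 (fun k => ((j : Int), k)) (fun k => (k, i)) _ _ h1]
  rw [pvFoldl_condRemove _ _ _ (h1.filter _)]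
  rw [pvFoldl_condRemove _ _ _ ((h1.filter _).filter _)]
  rw [pvFoldl_condRemove _ _ _ (((h1.filter _).filter _).filter _)]
  rw [pvFoldl_condRemove _ _ _ ((((h1.filter _).filter _).filter _).filter _)]
  rw [List.filter_filter, List.filter_filter, List.filter_filter, List.filter_filter]
  apply List.filter_congr
  rintro ⟨a, b⟩ hp
  obtain ⟨ha0, ha7, hb0, hb7⟩ : 0 ≤ a ∧ a ≤ 7 ∧ 0 ≤ b ∧ b ≤ 7 := hL.2 _ hp
  rw [Bool.eq_iff_iff]
  simp only [Bool.and_eq_true, List.all_eq_true, bne_iff_ne, ne_eq, Prod.mk.injEq,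
    PySem.List.mem_pyRange_one, PySem.List.mem_pyRange_neg_one, pvNoAttack,
    decide_eq_true_eq, not_and]
  constructor
  · rintro ⟨⟨⟨⟨h5, h4⟩, h3⟩, h2⟩, h1c⟩
    refine ⟨⟨⟨?_, ?_⟩, ?_⟩, ?_⟩
    · intro haj
      exact (h1c b ⟨hb0, by omega⟩).1 haj rfl
    · intro hbi
      exact (h1c a ⟨ha0, by omega⟩).2 rfl hbi
    · intro hd
      by_cases hle : a ≤ j
      · have habs : |a - j| = j - a := by rw [abs_of_nonpos (by omega)]; ring
        exact h2 a ⟨by omega, hle⟩ rfl (by omega)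
      · have habs : |a - j| = a - j := abs_of_nonneg (by omega)
        exact h3 a ⟨by omega, by omega⟩ rfl (by omega)
    · intro hd
      by_cases hle : b ≤ i
      · have habs : |b - i| = i - b := by rw [abs_of_nonpos (by omega)]; ring
        exact h4 b ⟨by omega, hle⟩ (by omega) rfl
      · have habs : |b - i| = b - i := abs_of_nonneg (by omega)
        exact h5 b ⟨by omega, by omega⟩ (by omega) rfl
  · rintro ⟨⟨⟨n1, n2⟩, n3⟩, n4⟩
    refine ⟨⟨⟨⟨?_, ?_⟩, ?_⟩, ?_⟩, ?_⟩
    · intro k hk hak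
      have habs : |k - i| = k - i := abs_of_nonneg (by omega)
      intro hbk
      exact n4 (by omega)
    · intro k hk hak
      have habs : |k - i| = i - k := by rw [abs_of_nonpos (by omega)]; ring
      intro hbk
      exact n4 (by omega)
    · intro k hk hak
      have habs : |k - j| = k - j := abs_of_nonneg (by omega)
      subst hak
      intro hbk
      exact n3 (by omega)
    · intro k hk hak
      have habs : |k - j| = j - k := by rw [abs_of_nonpos (by omega)]; ring
      subst hak
      intro hbk
      exact n3 (by omega)
    · intro k hk
      constructor
      · intro haj _; exact n1 haj
      · intro _ hbi; exact n2 hbi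

-- processing one row of the board, enumerated from j
lemma pvRow_eq (i : Int) (row : List Int) (j : Int) (L : List (Int × Int)) (hL : pvGood L) :
    (PySem.List.enumerate row j).foldl
        (fun res js => if js.2 ≠ 0 then pvQueenRemovals res i js.1 else res) L
      = L.filter (fun p =>
          ((PySem.List.enumerate row j).filterMap (fun js =>
            if js.2 ≠ 0 then some (js.1, i) else none)).all (fun q => pvNoAttack p.1 p.2 q)) := by
  induction row generalizing j L with
  | nil => simp [PySem.List.enumerate_nil]
  | cons slot row ih =>
    rw [PySem.List.enumerate_cons]
    simp only [List.foldl_cons]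
    by_cases hs : slot = 0
    · rw [if_neg (by simpa using hs), List.filterMap_cons_none (by simp [hs])]
      exact ih (j + 1) L hL
    · rw [if_pos hs,
        show (List.filterMap (fun js => if js.2 ≠ 0 then some (js.1, i) else none)
            (((j : Int), slot) :: PySem.List.enumerate row (j + 1)))
          = ((j : Int), i) :: List.filterMap
              (fun js => if js.2 ≠ 0 then some (js.1, i) else none)
              (PySem.List.enumerate row (j + 1)) from by simp [hs],
        pvQueenRemovals_eq_filter L i j hL,
        ih (j + 1) _ (pvGood_filter L hL _), List.filter_filter]
      apply List.filter_congr
      intro p _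
      simp only [List.all_cons]
      ac_rfl

-- processing the whole board, rows enumerated from i
lemma pvBoard_eq (board : List (List Int)) (i : Int) (L : List (Int × Int)) (hL : pvGood L) :
    (PySem.List.enumerate board i).foldl (fun res ir =>
        (PySem.List.enumerate ir.2).foldl
          (fun res js => if js.2 ≠ 0 then pvQueenRemovals res ir.1 js.1 else res) res) L
      = L.filter (fun p =>
          ((PySem.List.enumerate board i).flatMap (fun ir =>
            (PySem.List.enumerate ir.2).filterMap (fun js =>
              if js.2 ≠ 0 then some (js.1, ir.1) else none))).all
            (fun q => pvNoAttack p.1 p.2 q)) := by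
  induction board generalizing i L with
  | nil => simp [PySem.List.enumerate_nil]
  | cons row rows ih =>
    rw [PySem.List.enumerate_cons]
    simp only [List.foldl_cons, List.flatMap_cons]
    rw [pvRow_eq i row 0 L hL,
      ih (i + 1) _ (pvGood_filter L hL _), List.filter_filter]
    apply List.filter_congr
    intro p _
    simp only [List.all_append]
    ac_rfl

-- B's square loop: 'if not attacked: result.append((a, b))' accumulation is map-then-filter
lemma pvAlt_foldl (Q : List (Int × Int)) (l : List Int) (acc : List (Int × Int)) :
    l.foldl (fun res x =>
        let a := PySem.Int.floordiv x 8
        let b := PySem.Int.mod x 8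
        if Q.all (pvNoAttack a b) then res ++ [(a, b)] else res) acc
      = acc ++ (l.map (fun x => (PySem.Int.floordiv x 8, PySem.Int.mod x 8))).filter
          (fun p => Q.all (pvNoAttack p.1 p.2)) := by
  induction l generalizing acc with
  | nil => simp
  | cons x l ih =>
    simp only [List.foldl_cons, List.map_cons, List.filter_cons]
    by_cases h : Q.all (pvNoAttack (PySem.Int.floordiv x 8) (PySem.Int.mod x 8))
    · rw [if_pos h, if_pos h, ih]
      simp only [List.append_assoc, List.singleton_append]
    · rw [if_neg h, if_neg h, ih]

lemma pvGood_init :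
    pvGood ((PySem.List.pyRange 0 64 1).map
      (fun x => (PySem.Int.floordiv x 8, PySem.Int.mod x 8))) := by
  constructor
  · decide
  · decide

-- ===== VERDICT (by name: the statement is the Claim_ definition above) =====
theorem empty_slots_spec : Claim_equal_empty_slots := by
  intro board _
  show empty_slots board = empty_slots_alt board
  unfold empty_slots empty_slots_alt
  rw [pvBoard_eq board 0 _ pvGood_init, pvAlt_foldl, List.nil_append]
  exact List.filter_congr (fun p _ => rfl)
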